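-- pv_equiv track=rewrite | github.com/shimomocloZ/drawing-from-python | src/choose.py | choose_buyer
-- ===== SOURCE A (Python) =====
-- def choose_buyer(current_drawings: dict, product_name: str):
--     max_number = max(current_drawings[product_name], key=lambda x: x['number_of_buy'])[
--         'number_of_buy']
--     min_number = min(current_drawings[product_name], key=lambda x: x['number_of_buy'])[
--         'number_of_buy']
--     buyers_of_product = current_drawings[product_name]
--     # 最大値と最小値が混在している場合は最大値をリストから除去する
--     if max_number != min_number:
--         buyers_of_product = [buyer for buyer in current_drawings[product_name]
--                              if buyer['number_of_buy'] == min_number]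
--
--     # 一人に絞れたらTrue, 複数人の場合はFalse
--     return buyers_of_product, len(buyers_of_product) == 1
-- ===== SOURCE B (Python) =====
-- def choose_buyer(current_drawings: dict, product_name: str):
--     # single pass: track the current minimal buy count and its winners online
--     best = None
--     winners = []
--     for buyer in current_drawings[product_name]:
--         n = buyer['number_of_buy']
--         if best is None or n < best:
--             best = n
--             winners = [buyer]
--         elif n == best:
--             winners.append(buyer)
--     return winners, len(winners) == 1
-- ===== Notes on version B (the rewrite author's own statement) =====
-- stated objective: alternative
-- what changed: B replaces A's three staged passes (max scan, min scan, conditional filter) by one online pass that maintains the current minimum and its list of winners, resetting the list when a smaller count appears.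
import Mathlib
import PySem

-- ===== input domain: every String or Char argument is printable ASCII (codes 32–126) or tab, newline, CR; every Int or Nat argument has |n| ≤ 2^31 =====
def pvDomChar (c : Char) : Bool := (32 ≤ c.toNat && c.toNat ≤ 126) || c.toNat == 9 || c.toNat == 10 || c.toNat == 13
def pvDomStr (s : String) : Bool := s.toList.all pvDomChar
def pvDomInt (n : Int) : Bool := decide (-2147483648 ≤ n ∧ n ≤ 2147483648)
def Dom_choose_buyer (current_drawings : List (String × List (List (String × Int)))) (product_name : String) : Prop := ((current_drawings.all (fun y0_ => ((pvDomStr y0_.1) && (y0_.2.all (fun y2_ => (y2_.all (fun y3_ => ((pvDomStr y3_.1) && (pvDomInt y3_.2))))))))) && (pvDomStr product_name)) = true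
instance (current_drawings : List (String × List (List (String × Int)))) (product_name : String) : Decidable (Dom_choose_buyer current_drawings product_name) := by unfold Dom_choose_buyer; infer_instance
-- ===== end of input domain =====

-- B replaces A's three staged passes (max scan, min scan, conditional filter) by one online pass
-- maintaining the current minimum and its winners list. Objective: alternative (same cost).


-- shared dict primitives: first-match association-list lookup (Python dict lookup)
def pvLookup (current_drawings : List (String × List (List (String × Int)))) (product_name : String) : Option (List (List (String × Int))) :=
  (current_drawings.find? (fun p => p.1 == product_name)).map (·.2)

-- buyer['number_of_buy'] (total form; Pre_ guarantees the key is present, so the default is never used)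
def pvNB (b : List (String × Int)) : Int :=
  ((b.find? (fun q => q.1 == "number_of_buy")).map (·.2)).getD 0

-- ===== PORT A =====
def choose_buyer (current_drawings : List (String × List (List (String × Int)))) (product_name : String) : (List (List (String × Int))) × Bool :=
  match pvLookup current_drawings product_name with
  | none => ([], false)   -- KeyError in Python: excluded by Pre_
  | some buyers =>
    match PySem.List.max? buyers pvNB, PySem.List.min? buyers pvNB with
    | some mx, some mn =>
      let max_number := pvNB mx
      let min_number := pvNB mn
      let buyers_of_product :=
        if max_number ≠ min_number then buyers.filter (fun b => pvNB b == min_number) else buyers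
      (buyers_of_product, buyers_of_product.length == 1)
    | _, _ => ([], false)  -- ValueError (empty list): excluded by Pre_

-- ===== PORT B =====
-- loop body of B's single pass: state = (current best, winners so far)
def bStep (st : Option Int × List (List (String × Int))) (b : List (String × Int)) :
    Option Int × List (List (String × Int)) :=
  let n := pvNB b
  match st with
  | (none, _) => (some n, [b])
  | (some m, ws) =>
    if n < m then (some n, [b])
    else if n = m then (some m, ws ++ [b])
    else (some m, ws)

def choose_buyer_alt (current_drawings : List (String × List (List (String × Int)))) (product_name : String) : (List (List (String × Int))) × Bool :=
  match pvLookup current_drawings product_name with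
  | none => ([], false)   -- KeyError in Python: excluded by Pre_
  | some buyers =>
    let st := buyers.foldl bStep (none, [])
    (st.2, st.2.length == 1)

-- ===== PRECONDITION & SPEC =====
-- Pre_ excludes exactly the inputs where the Python raises: product_name absent (KeyError),
-- its buyer list empty (ValueError from max/min), or a buyer without the 'number_of_buy' key (KeyError).
def Pre_choose_buyer (current_drawings : List (String × List (List (String × Int)))) (product_name : String) : Prop :=
  ((pvLookup current_drawings product_name).elim false
    (fun buyers => !buyers.isEmpty &&
      buyers.all (fun b => (b.find? (fun q => q.1 == "number_of_buy")).isSome))) = true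
instance (current_drawings : List (String × List (List (String × Int)))) (product_name : String) : Decidable (Pre_choose_buyer current_drawings product_name) := by unfold Pre_choose_buyer; infer_instance

def pvWitness_choose_buyer : (List (String × List (List (String × Int)))) × String :=
  ([("apple", [[("number_of_buy", 2)], [("number_of_buy", 1)]])], "apple")

def Spec_choose_buyer (current_drawings : List (String × List (List (String × Int)))) (product_name : String) (out : (List (List (String × Int))) × Bool) : Prop := out = choose_buyer_alt current_drawings product_name
instance (current_drawings : List (String × List (List (String × Int)))) (product_name : String) (out : (List (List (String × Int))) × Bool) : Decidable (Spec_choose_buyer current_drawings product_name out) := by unfold Spec_choose_buyer; infer_instance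

-- ===== CLAIM =====
def Claim_equal_choose_buyer : Prop := ∀ (current_drawings : List (String × List (List (String × Int)))) (product_name : String), Dom_choose_buyer current_drawings product_name → Pre_choose_buyer current_drawings product_name → Spec_choose_buyer current_drawings product_name (choose_buyer current_drawings product_name)

-- ===== LEMMAS AND PROOFS =====

-- running minimum of the buy counts
def runMin (l : List (List (String × Int))) (m : Int) : Int :=
  l.foldl (fun a b => min a (pvNB b)) m

theorem runMin_le_init (l : List (List (String × Int))) (m : Int) : runMin l m ≤ m := by
  induction l generalizing m with
  | nil => simp [runMin]
  | cons b t ih =>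
    have := ih (min m (pvNB b))
    simp only [runMin, List.foldl] at *
    omega

theorem runMin_le_mem (l : List (List (String × Int))) (m : Int) (b : List (String × Int))
    (hb : b ∈ l) : runMin l m ≤ pvNB b := by
  induction l generalizing m with
  | nil => cases hb
  | cons c t ih =>
    rcases List.mem_cons.mp hb with h | h
    · subst h
      have := runMin_le_init t (min m (pvNB b))
      simp only [runMin, List.foldl] at *
      omega
    · exact ih (min m (pvNB c)) h

theorem runMin_attained (l : List (List (String × Int))) (m : Int) :
    runMin l m = m ∨ ∃ b ∈ l, runMin l m = pvNB b := by
  induction l generalizing m with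
  | nil => exact Or.inl rfl
  | cons c t ih =>
    rcases ih (min m (pvNB c)) with h | ⟨b, hb, h⟩
    · simp only [runMin, List.foldl] at *
      rcases le_total m (pvNB c) with hle | hle
      · left; omega
      · right; exact ⟨c, List.mem_cons_self, by omega⟩
    · right
      exact ⟨b, List.mem_cons_of_mem _ hb, h⟩

-- the loop invariant of B's single pass
theorem bLoop_inv (rest pref : List (List (String × Int))) (m : Int)
    (hmin : ∀ b ∈ pref, m ≤ pvNB b) :
    rest.foldl bStep (some m, pref.filter (fun b => pvNB b == m))
      = (some (runMin rest m), (pref ++ rest).filter (fun b => pvNB b == runMin rest m)) := by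
  induction rest generalizing pref m with
  | nil => simp [runMin]
  | cons b rs ih =>
    simp only [List.foldl, bStep]
    by_cases h1 : pvNB b < m
    · rw [if_pos h1]
      have hpref : (pref ++ [b]).filter (fun x => pvNB x == pvNB b) = [b] := by
        rw [List.filter_append]
        have hnil : pref.filter (fun x => pvNB x == pvNB b) = [] := by
          apply List.filter_eq_nil_iff.mpr
          intro x hx
          have := hmin x hx
          simp only [beq_iff_eq]
          omega
        simp [hnil]
      have hmin' : ∀ x ∈ pref ++ [b], pvNB b ≤ pvNB x := by
        intro x hx
        rcases List.mem_append.mp hx with h | h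
        · have := hmin x h; omega
        · simp at h; subst h; omega
      have hih := ih (pref ++ [b]) (pvNB b) hmin'
      rw [hpref] at hih
      have hm : runMin (b :: rs) m = runMin rs (pvNB b) := by
        simp only [runMin, List.foldl]
        congr 1
        omega
      rw [hm, show pref ++ b :: rs = (pref ++ [b]) ++ rs by simp]
      exact hih
    · rw [if_neg h1]
      have hm : runMin (b :: rs) m = runMin rs m := by
        simp only [runMin, List.foldl]
        congr 1
        omega
      by_cases h2 : pvNB b = m
      · rw [if_pos h2]
        have hws : pref.filter (fun x => pvNB x == m) ++ [b]
            = (pref ++ [b]).filter (fun x => pvNB x == m) := by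
          simp [List.filter_append, h2]
        have hmin' : ∀ x ∈ pref ++ [b], m ≤ pvNB x := by
          intro x hx
          rcases List.mem_append.mp hx with h | h
          · exact hmin x h
          · simp at h; subst h; omega
        rw [hws, ih (pref ++ [b]) m hmin', hm,
          show pref ++ b :: rs = (pref ++ [b]) ++ rs by simp]
      · rw [if_neg h2]
        have hws : pref.filter (fun x => pvNB x == m)
            = (pref ++ [b]).filter (fun x => pvNB x == m) := by
          simp [List.filter_append, h2]
        have hmin' : ∀ x ∈ pref ++ [b], m ≤ pvNB x := by
          intro x hx
          rcases List.mem_append.mp hx with h | h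
          · exact hmin x h
          · simp at h; subst h; omega
        rw [hws, ih (pref ++ [b]) m hmin', hm,
          show pref ++ b :: rs = (pref ++ [b]) ++ rs by simp]

-- B's pass on a nonempty list yields the first-pass minimum's filter
theorem bLoop_eq (b0 : List (String × Int)) (rs : List (List (String × Int))) :
    (b0 :: rs).foldl bStep (none, [])
      = (some (runMin rs (pvNB b0)),
         (b0 :: rs).filter (fun b => pvNB b == runMin rs (pvNB b0))) := by
  have hih := bLoop_inv rs [b0] (pvNB b0) (by intro x hx; simp at hx; subst hx; omega)
  simp only [List.foldl, bStep]
  simp only [List.filter, pvNB, beq_self_eq_true, List.singleton_append] at hih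
  exact hih

-- the running minimum equals the key of A's min? result
theorem runMin_eq_min? (b0 : List (String × Int)) (rs : List (List (String × Int)))
    (mn : List (String × Int)) (hmn : PySem.List.min? (b0 :: rs) pvNB = some mn) :
    runMin rs (pvNB b0) = pvNB mn := by
  have hmem := PySem.List.min?_mem hmn
  have hle := PySem.List.min?_isMin hmn
  have h1 : runMin rs (pvNB b0) ≤ pvNB mn := by
    rcases List.mem_cons.mp hmem with h | h
    · rw [h]; exact runMin_le_init rs (pvNB b0)
    · exact runMin_le_mem rs (pvNB b0) mn h
  have h2 : pvNB mn ≤ runMin rs (pvNB b0) := by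
    rcases runMin_attained rs (pvNB b0) with h | ⟨b, hb, h⟩
    · rw [h]; exact hle b0 List.mem_cons_self
    · rw [h]; exact hle b (List.mem_cons_of_mem _ hb)
  omega

-- when the maximum key equals the minimum key, the filter keeps everything
theorem filter_eq_self_of_max_eq_min (buyers : List (List (String × Int))) (mx mn : List (String × Int))
    (hmx : PySem.List.max? buyers pvNB = some mx) (hmn : PySem.List.min? buyers pvNB = some mn)
    (heq : pvNB mx = pvNB mn) :
    buyers.filter (fun b => pvNB b == pvNB mn) = buyers := by
  apply List.filter_eq_self.mpr
  intro b hb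
  have h1 := PySem.List.max?_isMax hmx b hb
  have h2 := PySem.List.min?_isMin hmn b hb
  simp only [beq_iff_eq]
  omega

-- ===== VERDICT =====
theorem choose_buyer_spec : Claim_equal_choose_buyer := by
  intro cd pn _hdom _hpre
  unfold Spec_choose_buyer choose_buyer choose_buyer_alt
  cases hL : pvLookup cd pn with
  | none => rfl
  | some buyers =>
    cases buyers with
    | nil => simp [PySem.List.max?, PySem.List.min?]
    | cons b0 rs =>
      cases hmx : PySem.List.max? (b0 :: rs) pvNB with
      | none =>
        exact absurd ((PySem.List.max?_eq_none_iff _ pvNB).mp hmx) (by simp)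
      | some mx =>
        cases hmn : PySem.List.min? (b0 :: rs) pvNB with
        | none =>
          exact absurd ((PySem.List.min?_eq_none_iff _ pvNB).mp hmn) (by simp)
        | some mn =>
          simp only [hmx, hmn, bLoop_eq, runMin_eq_min? b0 rs mn hmn]
          by_cases h : pvNB mx = pvNB mn
          · rw [if_neg (by simpa using h), filter_eq_self_of_max_eq_min _ mx mn hmx hmn h]
          · rw [if_pos (by simpa using h)]
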